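-- pv_equiv track=rewrite | github.com/Tonyhwl/BlackJack-Simulation | Fixed_Fractional.py | current_total_and_soft
-- ===== SOURCE A (Python) =====
-- value_mapping = {
-- #cv = card value
--     '2' : 2,
--     '3' : 3,
--     '4' : 4,
--     '5' : 5,
--     '6' : 6,
--     '7' : 7,
--     '8' : 8,
--     '9' : 9,
--     '10' : 10,
--     'Jack' : 10,
--     'Queen' : 10,
--     'King' : 10,
-- }
--
-- def current_total_and_soft(hand):
--     total, aces = 0, 0 # aces = number of aces seen
--
--     #loop through every card in the player's or dealer's hand
--     for card in hand:
--         rank = card.split(' of ')[0] # only want the rank part of 'Queen of Spades' etc.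
--         v = 11 if rank == 'Ace' else value_mapping[rank]
--         total += v
--         if rank == 'Ace':
--             aces += 1
--     while total > 21 and aces:
--         total -= 10
--         aces -= 1
--
--     # If any Ace is still counted as 11 → hand is "soft", else it's "hard"
--     return total, (aces > 0)
-- ===== SOURCE B (Python) =====
-- value_mapping = {
--     '2': 2, '3': 3, '4': 4, '5': 5, '6': 6, '7': 7, '8': 8, '9': 9,
--     '10': 10, 'Jack': 10, 'Queen': 10, 'King': 10,
-- }
--
-- def current_total_and_soft(hand):
--     # One pass: count every ace as 1 into a hard total, remember how many aces.
--     hard, aces = 0, 0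
--     for card in hand:
--         rank = card.split(' of ')[0]
--         if rank == 'Ace':
--             hard += 1
--             aces += 1
--         else:
--             hard += value_mapping[rank]
--     # At most one ace can count as 11 without busting (two would need hard+20 <= 21
--     # with hard >= 2). Softness in closed form, no downgrade loop:
--     if aces > 0 and hard + 10 <= 21:
--         return hard + 10, True
--     return hard, False
-- ===== Notes on version B (the rewrite author's own statement) =====
-- stated objective: alternative
-- what changed: B sums each ace as 1 while counting aces in one pass and decides softness with a single arithmetic conditional (hard+10 <= 21), eliminating A's subtractive while-loop downgrade of 11-valued aces.
import Mathlib
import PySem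

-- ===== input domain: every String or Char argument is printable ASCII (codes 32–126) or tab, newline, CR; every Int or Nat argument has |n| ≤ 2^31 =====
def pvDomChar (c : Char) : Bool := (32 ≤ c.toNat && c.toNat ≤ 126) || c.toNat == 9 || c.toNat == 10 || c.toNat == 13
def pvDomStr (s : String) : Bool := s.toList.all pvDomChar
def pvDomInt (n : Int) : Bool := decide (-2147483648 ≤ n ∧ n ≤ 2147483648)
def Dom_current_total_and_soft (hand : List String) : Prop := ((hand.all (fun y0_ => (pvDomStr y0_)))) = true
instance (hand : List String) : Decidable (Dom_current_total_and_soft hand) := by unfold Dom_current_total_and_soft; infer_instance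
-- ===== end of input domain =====

-- B replaces A's subtractive while-loop ace downgrade by summing aces as 1 and a single
-- closed-form softness conditional; equivalence of the two is proved on hands of known ranks.

-- shared helpers: the rank of a card string, and the module-level value_mapping
def pvRank (card : String) : String :=
  (((PySem.Str.split? card " of ").getD []).headD "")

def pvValueMapping : PySem.Dict String Int :=
  PySem.Dict.ofList [("2", 2), ("3", 3), ("4", 4), ("5", 5), ("6", 6), ("7", 7),
                     ("8", 8), ("9", 9), ("10", 10), ("Jack", 10), ("Queen", 10), ("King", 10)]

-- ===== PORT A =====
-- the while-loop: aces (a Python int counting aces seen, always ≥ 0) ported as the Nat fuel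
def pvWhileA : Int → Nat → Int × Nat
  | total, 0 => (total, 0)
  | total, a + 1 => if total > 21 then pvWhileA (total - 10) a else (total, a + 1)

def current_total_and_soft (hand : List String) : Int × Bool :=
  let st := hand.foldl (fun (st : Int × Nat) card =>
    let rank := pvRank card
    let v : Int := if rank == "Ace" then 11 else pvValueMapping.getD rank 0
    (st.1 + v, if rank == "Ace" then st.2 + 1 else st.2)) (0, 0)
  let r := pvWhileA st.1 st.2
  (r.1, decide (r.2 > 0))

-- ===== PORT B =====
def current_total_and_soft_alt (hand : List String) : Int × Bool :=
  let st := hand.foldl (fun (st : Int × Nat) card =>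
    let rank := pvRank card
    if rank == "Ace" then (st.1 + 1, st.2 + 1)
    else (st.1 + pvValueMapping.getD rank 0, st.2)) (0, 0)
  if st.2 > 0 ∧ st.1 + 10 ≤ 21 then (st.1 + 10, true) else (st.1, false)

-- ===== PRECONDITION & SPEC =====
-- Pre_ excludes exactly the hands containing a card whose rank is not a blackjack rank:
-- there A (and B) raise KeyError on the value_mapping lookup.
def pvRanks : List String :=
  ["2", "3", "4", "5", "6", "7", "8", "9", "10", "Jack", "Queen", "King", "Ace"]

def Pre_current_total_and_soft (hand : List String) : Prop :=
  ∀ card ∈ hand, pvRank card ∈ pvRanks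

instance (hand : List String) : Decidable (Pre_current_total_and_soft hand) := by
  unfold Pre_current_total_and_soft; infer_instance

def pvWitness_current_total_and_soft : List String :=
  ["Ace of Spades", "King of Hearts", "Ace of Clubs", "7 of Diamonds"]

def Spec_current_total_and_soft (hand : List String) (out : Int × Bool) : Prop := out = current_total_and_soft_alt hand
instance (hand : List String) (out : Int × Bool) : Decidable (Spec_current_total_and_soft hand out) := by unfold Spec_current_total_and_soft; infer_instance

-- ===== CLAIM (what is proved, stated in full; the proofs are below) =====
def Claim_equal_current_total_and_soft : Prop := ∀ (hand : List String), Dom_current_total_and_soft hand → Pre_current_total_and_soft hand → Spec_current_total_and_soft hand (current_total_and_soft hand)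

-- ===== LEMMAS AND PROOFS =====

-- a non-Ace rank of the table has value between 2 and 10
theorem pv_value_pos (r : String) (hr : r ∈ pvRanks) (hne : r ≠ "Ace") :
    2 ≤ pvValueMapping.getD r 0 := by
  fin_cases hr <;> first | decide | exact absurd rfl hne

-- fold invariant: A's state is (hard + 10*aces, aces) when B's is (hard, aces), and aces ≤ hard
theorem pv_fold_inv (hand : List String) (hpre : ∀ card ∈ hand, pvRank card ∈ pvRanks)
    (h : Int) (a : Nat) (hha : (a : Int) ≤ h) :
    hand.foldl (fun (st : Int × Nat) card =>
      let rank := pvRank card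
      let v : Int := if rank == "Ace" then 11 else pvValueMapping.getD rank 0
      (st.1 + v, if rank == "Ace" then st.2 + 1 else st.2)) (h + 10 * a, a)
    = (let st := hand.foldl (fun (st : Int × Nat) card =>
        let rank := pvRank card
        if rank == "Ace" then (st.1 + 1, st.2 + 1)
        else (st.1 + pvValueMapping.getD rank 0, st.2)) (h, a)
       (st.1 + 10 * st.2, st.2))
    ∧ (let st := hand.foldl (fun (st : Int × Nat) card =>
        if pvRank card == "Ace" then (st.1 + 1, st.2 + 1)
        else (st.1 + pvValueMapping.getD (pvRank card) 0, st.2)) (h, a)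
       (st.2 : Int) ≤ st.1) := by
  induction hand generalizing h a with
  | nil => exact ⟨rfl, hha⟩
  | cons card rest ih =>
    have hcard := hpre card (List.mem_cons_self ..)
    have hrest : ∀ c ∈ rest, pvRank c ∈ pvRanks := fun c hc => hpre c (List.mem_cons_of_mem _ hc)
    by_cases hace : pvRank card = "Ace"
    · simp only [List.foldl_cons, hace]
      have := ih hrest (h + 1) (a + 1) (by push_cast; omega)
      simp only [beq_self_eq_true, if_true] at this ⊢
      refine ⟨?_, this.2⟩
      have e : h + 10 * (a : Int) + 11 = h + 1 + 10 * ((a : Nat) + 1 : Nat) := by push_cast; ring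
      rw [e]; exact this.1
    · simp only [List.foldl_cons]
      have hbe : (pvRank card == "Ace") = false := beq_eq_false_iff_ne.mpr hace
      have hv := pv_value_pos _ hcard hace
      have := ih hrest (h + pvValueMapping.getD (pvRank card) 0) a (by omega)
      simp only [hbe, if_false, Bool.false_eq_true] at this ⊢
      refine ⟨?_, this.2⟩
      have e : h + 10 * (a : Int) + pvValueMapping.getD (pvRank card) 0
             = h + pvValueMapping.getD (pvRank card) 0 + 10 * a := by ring
      rw [e]; exact this.1

-- the while loop in closed form, given hard ≥ aces
theorem pv_while_closed (a : Nat) (h : Int) (hha : (a : Int) ≤ h) :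
    pvWhileA (h + 10 * a) a
      = if 0 < a ∧ h + 10 ≤ 21 then (h + 10, 1) else (h, 0) := by
  induction a generalizing h with
  | zero => simp [pvWhileA]
  | succ a ih =>
    rcases Nat.eq_zero_or_pos a with ha0 | hapos
    · subst ha0
      simp only [pvWhileA]
      by_cases hb : h + 10 * ((0 : Nat) + 1 : Nat) > 21
      · rw [if_pos hb]
        have hc : ¬ ((0 : Nat) < 0 + 1 ∧ h + 10 ≤ 21) := by push_cast at hb; omega
        simp only [if_neg hc]
        push_cast; ring_nf
      · rw [if_neg hb]
        have : (0 : Nat) < 0 + 1 ∧ h + 10 ≤ 21 := by push_cast at hb; omega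
        rw [if_pos this]
        push_cast; ring_nf
    · -- a ≥ 1, so total = h + 10(a+1) ≥ a + 10a + 10 > 21
      have hbust : h + 10 * ((a : Nat) + 1 : Nat) > 21 := by push_cast; omega
      simp only [pvWhileA, if_pos hbust]
      have e : h + 10 * ((a : Nat) + 1 : Nat) - 10 = h + 10 * (a : Nat) := by push_cast; ring
      rw [e, ih h (by push_cast at hha ⊢; omega)]
      have : (0 < a ∧ h + 10 ≤ 21) ↔ (0 < a + 1 ∧ h + 10 ≤ 21) := by omega
      simp only [this]

-- ===== VERDICT (by name: the statement is the Claim_ definition above) =====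
theorem current_total_and_soft_spec : Claim_equal_current_total_and_soft := by
  intro hand _ hpre
  unfold Spec_current_total_and_soft current_total_and_soft current_total_and_soft_alt
  obtain ⟨hfold, hle⟩ := pv_fold_inv hand hpre 0 0 le_rfl
  simp only at hfold hle
  have h0 : (0 : Int) + 10 * ((0 : Nat) : Int) = 0 := by norm_num
  rw [h0] at hfold
  set stB := hand.foldl (fun (st : Int × Nat) card =>
      let rank := pvRank card
      if rank == "Ace" then (st.1 + 1, st.2 + 1)
      else (st.1 + pvValueMapping.getD rank 0, st.2)) (0, 0) with hstB
  rw [hfold]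
  dsimp only
  rw [pv_while_closed stB.2 stB.1 hle]
  by_cases hc : 0 < stB.2 ∧ stB.1 + 10 ≤ 21
  · rw [if_pos hc, if_pos hc]; simp
  · rw [if_neg hc, if_neg hc]; simp
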